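-- pv_equiv track=rewrite | github.com/CryptoFxxker/CTOS | ctos/drivers/backpack/util.py | batch_join_symbols
-- ===== SOURCE A (Python) =====
-- def batch_join_symbols(symbols, batch_size=9):
--     """
--     将字符串数组按指定批次大小拼接
--
--     参数:
--         symbols: 字符串列表
--         batch_size: 每批处理的数量，默认为9
--
--     返回:
--         拼接后的字符串列表
--     """
--     result = []
--     # 计算需要多少批次
--     num_batches = len(symbols) // batch_size
--     if len(symbols) % batch_size != 0:
--         num_batches += 1
--     for i in range(num_batches):
--     # 获取当前批次的元素
--         start_index = i * batch_size
--         end_index = start_index + batch_size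
--         batch = symbols[start_index:end_index]
--         # 拼接当前批次的元素
--         joined_str = ",".join(batch)  # 使用空格连接，可根据需要修改连接符
--         result.append(joined_str)
--     return result
-- ===== SOURCE B (Python) =====
-- def batch_join_symbols(symbols, batch_size=9):
--     """Single-pass accumulation: collect symbols into `current`, flush a
--     comma-joined batch whenever it reaches batch_size, flush the remainder."""
--     result = []
--     current = []
--     for sym in symbols:
--         current.append(sym)
--         if len(current) == batch_size:
--             result.append(",".join(current))
--             current = []
--     if current:
--         result.append(",".join(current))
--     return result
-- ===== Notes on version B (the rewrite author's own statement) =====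
-- stated objective: alternative
-- what changed: Replaces the num_batches computation and per-batch index/slice loop with a single element-wise pass that accumulates a running batch and flushes it when it reaches batch_size (plus a final flush of the remainder).
-- outside the precondition, e.g. on batch_join_symbols(['a', 'b', 'c'], -2): A returns [], B returns ['a,b,c']
import Mathlib
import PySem

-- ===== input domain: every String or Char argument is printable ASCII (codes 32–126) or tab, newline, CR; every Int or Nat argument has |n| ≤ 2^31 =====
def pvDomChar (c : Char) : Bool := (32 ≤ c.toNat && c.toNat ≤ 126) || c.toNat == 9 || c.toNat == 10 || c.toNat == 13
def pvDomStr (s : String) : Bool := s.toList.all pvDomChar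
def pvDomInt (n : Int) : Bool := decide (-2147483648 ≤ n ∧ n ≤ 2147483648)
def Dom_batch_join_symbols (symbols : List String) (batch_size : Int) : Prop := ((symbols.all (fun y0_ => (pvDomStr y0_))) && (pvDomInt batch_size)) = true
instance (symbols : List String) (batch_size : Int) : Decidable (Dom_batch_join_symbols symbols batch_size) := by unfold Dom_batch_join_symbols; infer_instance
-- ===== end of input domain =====

-- B replaces A's num_batches/index-slice loop by a single accumulating pass (alternative decomposition, same cost).

-- ===== PORT A =====
def batch_join_symbols (symbols : List String) (batch_size : Int) : List String :=
  let num_batches0 := PySem.Int.floordiv (PySem.List.len symbols) batch_size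
  let num_batches :=
    if PySem.Int.mod (PySem.List.len symbols) batch_size ≠ 0 then num_batches0 + 1 else num_batches0
  (PySem.List.pyRange 0 num_batches 1).foldl
    (fun result i =>
      let start_index := i * batch_size
      let end_index := start_index + batch_size
      let batch := PySem.List.slice symbols (some start_index) (some end_index)
      let joined_str := PySem.Str.join "," batch
      result ++ [joined_str]) []

-- ===== PORT B =====
-- B's loop body: append sym to the running batch, flush it when it reaches batch_size.
def bjsStep (batch_size : Int) (acc : List String × List String) (sym : String) : List String × List String :=
  let current := acc.2 ++ [sym]
  if PySem.List.len current = batch_size then (acc.1 ++ [PySem.Str.join "," current], [])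
  else (acc.1, current)

def batch_join_symbols_alt (symbols : List String) (batch_size : Int) : List String :=
  let st := symbols.foldl (bjsStep batch_size) ([], [])
  if st.2 ≠ [] then st.1 ++ [PySem.Str.join "," st.2] else st.1

-- ===== PRECONDITION & SPEC =====
-- Pre_ excludes batch_size ≤ 0: at batch_size = 0 A raises ZeroDivisionError, and for
-- batch_size < 0 A's empty result is an accident of Python floor division yielding a
-- non-positive batch count (B naturally returns the symbols as one batch there).
def Pre_batch_join_symbols (symbols : List String) (batch_size : Int) : Prop := 1 ≤ batch_size
instance (symbols : List String) (batch_size : Int) : Decidable (Pre_batch_join_symbols symbols batch_size) := by unfold Pre_batch_join_symbols; infer_instance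

def pvWitness_batch_join_symbols : List String × Int := (["BTC", "ETH", "SOL"], 2)

def Spec_batch_join_symbols (symbols : List String) (batch_size : Int) (out : List String) : Prop := out = batch_join_symbols_alt symbols batch_size
instance (symbols : List String) (batch_size : Int) (out : List String) : Decidable (Spec_batch_join_symbols symbols batch_size out) := by unfold Spec_batch_join_symbols; infer_instance

-- ===== CLAIM (what is proved, stated in full; the proofs are below) =====
def Claim_equal_batch_join_symbols : Prop := ∀ (symbols : List String) (batch_size : Int), Dom_batch_join_symbols symbols batch_size → Pre_batch_join_symbols symbols batch_size → Spec_batch_join_symbols symbols batch_size (batch_join_symbols symbols batch_size)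

-- ===== LEMMAS AND PROOFS =====

-- canonical chunked join; both ports are proved equal to it
def chunksJ (b : Nat) : List String → List String
  | [] => []
  | x :: xs => PySem.Str.join "," (x :: xs.take (b - 1)) :: chunksJ b (xs.drop (b - 1))
termination_by l => l.length
decreasing_by simp

theorem chunksJ_nil (b : Nat) : chunksJ b [] = [] := by rw [chunksJ.eq_def]

theorem chunksJ_eq (b : Nat) (hb : 1 ≤ b) (xs : List String) (hxs : xs ≠ []) :
    chunksJ b xs = PySem.Str.join "," (xs.take b) :: chunksJ b (xs.drop b) := by
  cases xs with
  | nil => exact absurd rfl hxs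
  | cons x t =>
    obtain ⟨b', rfl⟩ : ∃ b', b = b' + 1 := ⟨b - 1, by omega⟩
    rw [chunksJ.eq_def]
    simp

theorem chunksJ_short (b : Nat) (xs : List String) (h0 : xs ≠ []) (hle : xs.length ≤ b) :
    chunksJ b xs = [PySem.Str.join "," xs] := by
  cases xs with
  | nil => exact absurd rfl h0
  | cons x t =>
    rw [chunksJ.eq_def]
    have h1 : t.take (b - 1) = t := List.take_of_length_le (by simp at hle ⊢; omega)
    have h2 : t.drop (b - 1) = [] := List.drop_eq_nil_of_le (by simp at hle ⊢; omega)
    simp [h1, h2, chunksJ_nil]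

theorem ceil_eq (b n : Nat) (hb : 1 ≤ b) :
    (n + b - 1) / b = n / b + (if n % b = 0 then 0 else 1) := by
  have hqr := Nat.div_add_mod n b
  by_cases hz : n % b = 0
  · have h1 : n + b - 1 = (b - 1) + b * (n / b) := by omega
    rw [h1, Nat.add_mul_div_left _ _ (by omega : 0 < b), Nat.div_eq_of_lt (by omega)]
    simp [hz]
  · have hr : n % b < b := Nat.mod_lt _ (by omega)
    have hx : b * (n / b + 1) = b * (n / b) + b := by ring
    have h1 : n + b - 1 = (n % b - 1) + b * (n / b + 1) := by omega
    rw [h1, Nat.add_mul_div_left _ _ (by omega : 0 < b), Nat.div_eq_of_lt (by omega)]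
    simp [hz]

theorem ceil_step (b n : Nat) (hb : 1 ≤ b) (hn : 1 ≤ n) :
    (n + b - 1) / b = (n - b + b - 1) / b + 1 := by
  rcases Nat.lt_or_ge n b with h | h
  · have h1 : n - b = 0 := by omega
    have h2 : n + b - 1 = (n - 1) + b * 1 := by omega
    rw [h1, h2, Nat.add_mul_div_left _ _ (by omega : 0 < b), Nat.div_eq_of_lt (by omega)]
    rw [Nat.div_eq_of_lt (by omega)]
  · have h1 : n + b - 1 = (n - b + b - 1) + b := by omega
    rw [h1, Nat.add_div_right _ (by omega)]

-- A's loop, as a map over a ceiling-many range of slices, equals chunksJ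
theorem mapA_eq_chunksJ (b : Nat) (hb : 1 ≤ b) (xs : List String) :
    (List.range ((xs.length + b - 1) / b)).map
        (fun k => PySem.Str.join "," ((xs.drop (k * b)).take b)) = chunksJ b xs := by
  induction hn : xs.length using Nat.strong_induction_on generalizing xs with
  | _ n ih =>
  cases xs with
  | nil =>
    have h0 : n = 0 := by simpa using hn.symm
    subst h0
    rw [Nat.div_eq_of_lt (by omega : 0 + b - 1 < b)]
    simp [chunksJ_nil]
  | cons x t =>
    have hn1 : 1 ≤ n := by simp at hn; omega
    rw [ceil_step b n hb hn1, List.range_succ_eq_map, List.map_cons, List.map_map]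
    have hn' : t.length + 1 = n := by simpa using hn
    have hdlen : ((x :: t).drop b).length = n - b := by simp [List.length_drop]; omega
    have hrec := ih (n - b) (by omega) ((x :: t).drop b) hdlen
    rw [chunksJ_eq b hb (x :: t) (by simp)]
    congr 1
    · simp
    · rw [← hrec]
      apply List.map_congr_left
      intro k _
      simp only [Function.comp]
      rw [List.drop_drop]
      have hkb : k.succ * b = b + k * b := by rw [Nat.succ_mul]; ring
      rw [hkb]

-- one step of B's fold on a full batch flushes it
theorem bjsStep_flush (bs : Int) (res cur : List String) (y : String)
    (h : ((cur ++ [y]).length : Int) = bs) :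
    bjsStep bs (res, cur) y = (res ++ [PySem.Str.join "," (cur ++ [y])], []) := by
  have h' : ((cur.length : Int) + 1) = bs := by simpa using h
  simp [bjsStep, PySem.List.len_eq, h']

-- B's fold from any short running batch, against chunksJ on the remaining input
theorem foldB_eq (bs : Int) (hbs : 1 ≤ bs) :
    ∀ (xs res cur : List String), (cur.length : Int) < bs →
      (let st := xs.foldl (bjsStep bs) (res, cur)
       if st.2 ≠ [] then st.1 ++ [PySem.Str.join "," st.2] else st.1)
      = res ++ chunksJ bs.toNat (cur ++ xs) := by
  intro xs
  induction xs with
  | nil =>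
    intro res cur hcur
    simp only [List.foldl_nil, List.append_nil]
    by_cases h0 : cur = []
    · subst h0; simp [chunksJ_nil]
    · rw [chunksJ_short bs.toNat cur h0 (by omega)]
      simp [h0]
  | cons y ys ih =>
    intro res cur hcur
    simp only [List.foldl_cons]
    by_cases hfull : ((cur ++ [y]).length : Int) = bs
    · rw [bjsStep_flush bs res cur y hfull]
      rw [ih (res ++ [PySem.Str.join "," (cur ++ [y])]) [] (by simp; omega)]
      rw [chunksJ_eq bs.toNat (by omega) (cur ++ y :: ys) (by simp)]
      have htk : (cur ++ y :: ys).take bs.toNat = cur ++ [y] := by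
        have he : cur ++ y :: ys = (cur ++ [y]) ++ ys := by simp
        rw [he, List.take_append_of_le_length (by simp at hfull ⊢; omega)]
        rw [List.take_of_length_le (by simp at hfull ⊢; omega)]
      have hdr : (cur ++ y :: ys).drop bs.toNat = ys := by
        have he : cur ++ y :: ys = (cur ++ [y]) ++ ys := by simp
        rw [he, List.drop_append_of_le_length (by simp at hfull ⊢; omega)]
        rw [List.drop_eq_nil_of_le (by simp at hfull ⊢; omega), List.nil_append]
      rw [htk, hdr]
      simp
    · have h' : ¬ ((cur.length : Int) + 1 = bs) := by simpa using hfull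
      have hstep : bjsStep bs (res, cur) y = (res, cur ++ [y]) := by
        simp [bjsStep, PySem.List.len_eq, h']
      rw [hstep, ih res (cur ++ [y]) (by simp at h' ⊢; omega)]
      simp

theorem altB_eq_chunksJ (symbols : List String) (bs : Int) (hbs : 1 ≤ bs) :
    batch_join_symbols_alt symbols bs = chunksJ bs.toNat symbols := by
  have h := foldB_eq bs hbs symbols [] [] (by simp; omega)
  simpa [batch_join_symbols_alt] using h

theorem portA_eq_chunksJ (symbols : List String) (bs : Int) (hbs : 1 ≤ bs) :
    batch_join_symbols symbols bs = chunksJ bs.toNat symbols := by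
  obtain ⟨b, rfl⟩ : ∃ b : Nat, bs = (b : Int) := ⟨bs.toNat, (Int.toNat_of_nonneg (by omega)).symm⟩
  have hb : 1 ≤ b := by exact_mod_cast hbs
  unfold batch_join_symbols
  simp only [PySem.List.len_eq, PySem.Int.floordiv_natCast, PySem.Int.mod_natCast]
  have hnb : (if ((symbols.length % b : Nat) : Int) ≠ 0 then ((symbols.length / b : Nat) : Int) + 1
      else ((symbols.length / b : Nat) : Int)) = (((symbols.length + b - 1) / b : Nat) : Int) := by
    rw [ceil_eq b symbols.length hb]
    by_cases hz : symbols.length % b = 0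
    · simp [hz]
    · simp [hz]
      exact fun hd => hz (Nat.dvd_iff_mod_eq_zero.mp (by exact_mod_cast hd))
  rw [hnb, PySem.List.foldl_append_singleton_eq_map, PySem.List.pyRange_one, List.map_map]
  simp only [sub_zero, Int.toNat_natCast, zero_add]
  rw [← mapA_eq_chunksJ b hb symbols]
  apply List.map_congr_left
  intro k _
  simp only [Function.comp]
  have h1 : ((k : Int)) * (b : Int) = ((k * b : Nat) : Int) := by push_cast; ring
  rw [h1, show ((k * b : Nat) : Int) + ((b : Nat) : Int) = ((k * b + b : Nat) : Int) by push_cast; ring]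
  rw [PySem.List.slice_natCast]
  rw [show k * b + b - k * b = b by omega]

-- ===== VERDICT (by name: the statement is the Claim_ definition above) =====
theorem batch_join_symbols_spec : Claim_equal_batch_join_symbols := by
  intro symbols batch_size _ hpre
  unfold Spec_batch_join_symbols
  rw [portA_eq_chunksJ symbols batch_size hpre, altB_eq_chunksJ symbols batch_size hpre]
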